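-- pv_equiv track=rewrite | github.com/PRamoneda/ICASSP22 | approach_xgboost.py | predict_threshold
-- ===== SOURCE A (Python) =====
-- def predict_threshold(t1, t2, elements):
--     ans = []
--     for e in elements:
--         if e < t1:
--             ans.append(0)
--         elif t1 <= e <= t2:
--             ans.append(1)
--         else:
--             ans.append(2)
--     return ans
-- ===== SOURCE B (Python) =====
-- def predict_threshold(t1, t2, elements):
--     # staged passes over a preallocated label array:
--     # pass 1 promotes 0 -> 1 where e >= t1, pass 2 promotes 1 -> 2 where e > t2
--     labels = [0] * len(elements)
--     for i, e in enumerate(elements):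
--         if e >= t1:
--             labels[i] = 1
--     for i, e in enumerate(elements):
--         if labels[i] == 1 and e > t2:
--             labels[i] = 2
--     return labels
-- ===== Notes on version B (the rewrite author's own statement) =====
-- stated objective: alternative
-- what changed: Replaces A's single pass with a three-way if/elif/else appending to an accumulator by two staged promotion passes over a preallocated label array: first promote 0->1 where e >= t1, then promote 1->2 where the label is 1 and e > t2.
import Mathlib
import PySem

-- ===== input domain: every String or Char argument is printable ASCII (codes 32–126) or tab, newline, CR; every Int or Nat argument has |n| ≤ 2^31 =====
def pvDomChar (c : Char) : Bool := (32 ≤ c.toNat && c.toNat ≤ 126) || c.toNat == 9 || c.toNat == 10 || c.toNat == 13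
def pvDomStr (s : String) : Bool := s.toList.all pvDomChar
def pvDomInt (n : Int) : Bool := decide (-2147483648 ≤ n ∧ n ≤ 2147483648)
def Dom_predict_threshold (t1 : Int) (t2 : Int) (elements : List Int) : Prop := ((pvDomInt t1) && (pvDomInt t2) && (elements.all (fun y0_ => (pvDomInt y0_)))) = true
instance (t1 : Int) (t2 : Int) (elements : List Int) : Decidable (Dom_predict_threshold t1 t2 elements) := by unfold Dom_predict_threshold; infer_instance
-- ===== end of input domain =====

-- B replaces A's single-pass three-way branch append loop by two staged promotion
-- passes over a preallocated label array (0 -> 1 where e >= t1, then 1 -> 2 where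
-- e > t2); objective: alternative decomposition of the same O(n) classification.

-- ===== PORT A =====
-- literal transliteration of A's loop: fold accumulating ans, same branch order
def predict_threshold (t1 : Int) (t2 : Int) (elements : List Int) : List Int :=
  elements.foldl (fun ans e =>
    if e < t1 then ans ++ [0]
    else if t1 ≤ e ∧ e ≤ t2 then ans ++ [1]
    else ans ++ [2]) []

-- ===== PORT B =====
-- literal transliteration of Source B: labels = [0]*len(elements); two enumerate
-- loops doing indexed writes (labels[i] always in range, so getD is exact).
def predict_threshold_alt (t1 : Int) (t2 : Int) (elements : List Int) : List Int :=
  let labels := List.replicate elements.length (0 : Int)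
  let labels := (PySem.List.enumerate elements 0).foldl
    (fun lab p => if p.2 ≥ t1 then lab.set p.1.toNat 1 else lab) labels
  let labels := (PySem.List.enumerate elements 0).foldl
    (fun lab p => if lab.getD p.1.toNat 0 = 1 ∧ p.2 > t2 then lab.set p.1.toNat 2 else lab) labels
  labels

-- ===== PRECONDITION & SPEC =====
def Spec_predict_threshold (t1 : Int) (t2 : Int) (elements : List Int) (out : List Int) : Prop := out = predict_threshold_alt t1 t2 elements
instance (t1 : Int) (t2 : Int) (elements : List Int) (out : List Int) : Decidable (Spec_predict_threshold t1 t2 elements out) := by unfold Spec_predict_threshold; infer_instance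

-- ===== CLAIM (what is proved, stated in full; the proofs are below) =====
def Claim_equal_predict_threshold : Prop := ∀ (t1 : Int) (t2 : Int) (elements : List Int), Dom_predict_threshold t1 t2 elements → Spec_predict_threshold t1 t2 elements (predict_threshold t1 t2 elements)

-- ===== LEMMAS AND PROOFS =====

-- a conditional indexed-write pass over enumerate is a zipWith with the current contents
theorem foldl_set_enumerate (C : Int → Int → Prop) [inst : ∀ a b, Decidable (C a b)] (v : Int)
    (es : List Int) : ∀ (k : Nat) (L : List Int), L.length = k + es.length →
    (PySem.List.enumerate es (k : Int)).foldl
      (fun lab p => if C (lab.getD p.1.toNat 0) p.2 then lab.set p.1.toNat v else lab) L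
    = L.take k ++ List.zipWith (fun old e => if C old e then v else old) (L.drop k) es := by
  induction es with
  | nil =>
    intro k L hL
    simp only [PySem.List.enumerate_nil, List.foldl_nil, List.zipWith_nil_right, List.append_nil]
    exact (List.take_of_length_le (by simp at hL; omega)).symm
  | cons e es ih =>
    intro k L hL
    have hk : k < L.length := by rw [hL, List.length_cons]; omega
    rw [PySem.List.enumerate_cons]
    simp only [List.foldl_cons, Int.toNat_natCast]
    have hget : L.getD k 0 = L[k] := by
      simp [List.getD_eq_getElem?_getD, List.getElem?_eq_getElem hk]
    have hdropk : L.drop k = L[k] :: L.drop (k + 1) := List.drop_eq_getElem_cons hk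
    have hcast : ((k : Int) + 1) = ((k + 1 : Nat) : Int) := by push_cast; ring
    by_cases hc : C L[k] e
    · rw [if_pos (by rw [hget]; exact hc)]
      rw [hcast, ih (k + 1) (L.set k v) (by simp [hL]; omega)]
      rw [hdropk]
      simp only [List.zipWith_cons_cons, if_pos hc]
      have h1 : (L.set k v).drop (k + 1) = L.drop (k + 1) := by
        rw [List.drop_set, if_pos (by omega)]
      have h2 : (L.set k v).take (k + 1) = L.take k ++ [v] := by
        rw [List.take_set, List.take_succ_eq_append_getElem hk, List.set_append]
        rw [if_neg (by simp [Nat.min_eq_left hk.le])]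
        simp [Nat.min_eq_left hk.le]
      rw [h1, h2, List.append_assoc]
      simp
    · rw [if_neg (by rw [hget]; exact hc)]
      rw [hcast, ih (k + 1) L (by simp [hL]; omega)]
      rw [hdropk]
      simp only [List.zipWith_cons_cons, if_neg hc]
      have h2 : L.take (k + 1) = L.take k ++ [L[k]] := List.take_succ_eq_append_getElem hk
      rw [h2, List.append_assoc]
      simp

-- pass 1 from the all-zero array is a map
theorem pass1_eq (t1 : Int) (es : List Int) :
    List.zipWith (fun old e => if e ≥ t1 then (1 : Int) else old)
      (List.replicate es.length (0 : Int)) es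
    = es.map (fun e => if e ≥ t1 then (1 : Int) else 0) := by
  induction es with
  | nil => simp
  | cons e es ih => simp [List.replicate_succ, ih]

-- pass 2 over pass 1's output is a map of the composed classifier
theorem pass2_eq (t1 t2 : Int) (es : List Int) :
    List.zipWith (fun old e => if old = 1 ∧ e > t2 then (2 : Int) else old)
      (es.map (fun e => if e ≥ t1 then (1 : Int) else 0)) es
    = es.map (fun e => if (if e ≥ t1 then (1 : Int) else 0) = 1 ∧ e > t2 then (2 : Int)
                       else if e ≥ t1 then (1 : Int) else 0) := by
  induction es with
  | nil => simp
  | cons e es ih => simpa using ih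

theorem alt_eq_map (t1 t2 : Int) (es : List Int) :
    predict_threshold_alt t1 t2 es
    = es.map (fun e => if (if e ≥ t1 then (1 : Int) else 0) = 1 ∧ e > t2 then (2 : Int)
                       else if e ≥ t1 then (1 : Int) else 0) := by
  simp only [predict_threshold_alt]
  have H1 := foldl_set_enumerate (fun _ e => e ≥ t1) 1 es 0 (List.replicate es.length 0) (by simp)
  have H2 := foldl_set_enumerate (fun old e => old = 1 ∧ e > t2) 2 es 0
    (es.map (fun e => if e ≥ t1 then (1 : Int) else 0)) (by simp)
  simp only [Nat.cast_zero, List.take_zero, List.drop_zero, List.nil_append] at H1 H2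
  rw [H1, pass1_eq, H2, pass2_eq]

theorem a_acc (t1 t2 : Int) (es : List Int) (acc : List Int) :
    es.foldl (fun ans e =>
      if e < t1 then ans ++ [0]
      else if t1 ≤ e ∧ e ≤ t2 then ans ++ [1]
      else ans ++ [2]) acc
    = acc ++ es.map (fun e => if (if e ≥ t1 then (1 : Int) else 0) = 1 ∧ e > t2 then (2 : Int)
                              else if e ≥ t1 then (1 : Int) else 0) := by
  induction es generalizing acc with
  | nil => simp
  | cons e es ih =>
    simp only [List.foldl_cons, List.map_cons] at *
    split_ifs with h1 h2 <;> rw [ih] <;> simp <;> omega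

-- ===== VERDICT (by name: the statement is the Claim_ definition above) =====
theorem predict_threshold_spec : Claim_equal_predict_threshold := by
  intro t1 t2 elements _
  unfold Spec_predict_threshold predict_threshold
  rw [alt_eq_map, a_acc]
  simp
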